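-- pv_equiv track=rewrite | github.com/echoloop96/Informational-Genomics | ProgettoModelli.py | mfl
-- ===== SOURCE A (Python) =====
-- def get_alphabet(Seq):
--
--     ''' Returns the alphabet of the sequence
--         -----------
--         Parameters:
--             Seq(Bio.Seq) : reference sequence
--         Returns:
--             set(str) : set of strings (alphabet)
--     '''
--
--     alphabet = set()
--     for i in Seq:
--         alphabet.add(str(i))
--     return alphabet
--
-- def get_kmers(Seq, k):
--
--     ''' Returns the set of k-mers that occur in a given sequence
--         ----------
--         Paramaters:
--             Seq(Bio.Seq)
--             K(int)
--         Returns: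
--             set(str)
--     '''
--
--     kmers = set()
--     for i in range(len(Seq) - k +1):
--         kmers.add(str(Seq[i:i+k]))
--     return kmers
--
-- def mfl(Seq, alphabet = None):
--
--     """
--     Calculates the minimal forbidden length of a string s
--     ----------
--     Parameters:
--         Seq(Bio.Seq): the reference sequence
--         alphabet if passed
--
--     """
--
--     if alphabet == None:
--         a = len(get_alphabet(Seq))
--     else:
--         a = len(alphabet)
--
--     k = 0
--     while True:
--         k += 1
--         kmers = get_kmers(Seq,k)
--         if len(kmers) != a**k:
--             return k
-- ===== SOURCE B (Python) =====
-- def mfl(Seq, alphabet=None):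
--     # Different algorithm: instead of rebuilding the set of k-mers for every k,
--     # precompute for each position i the longest common prefix M[i] of Seq[i:]
--     # with any earlier suffix; the number of distinct k-mers is then
--     # (n-k+1) - #{i : M[i] >= k}, and we return the first k where that count
--     # differs from a**k (at most n+1).
--     if alphabet is None:
--         a = len(set(Seq))
--     else:
--         a = len(alphabet)
--     s = str(Seq)
--     n = len(s)
--     M = []
--     for i in range(n):
--         best = 0
--         for j in range(i):
--             l = 0
--             while i + l < n and s[j + l] == s[i + l]:
--                 l += 1
--             if l > best:
--                 best = l
--         M.append(best)
--     for k in range(1, n + 1):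
--         if n - k + 1 - sum(1 for m in M if m >= k) != a ** k:
--             return k
--     return n + 1
-- ===== Notes on version B (the rewrite author's own statement) =====
-- stated objective: alternative
-- what changed: Instead of rebuilding a hash set of k-mers for every k, B precomputes for each position the longest common prefix of its suffix with any earlier suffix and derives every distinct-k-mer count arithmetically from that one array, stopping by k = n+1.
import Mathlib
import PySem

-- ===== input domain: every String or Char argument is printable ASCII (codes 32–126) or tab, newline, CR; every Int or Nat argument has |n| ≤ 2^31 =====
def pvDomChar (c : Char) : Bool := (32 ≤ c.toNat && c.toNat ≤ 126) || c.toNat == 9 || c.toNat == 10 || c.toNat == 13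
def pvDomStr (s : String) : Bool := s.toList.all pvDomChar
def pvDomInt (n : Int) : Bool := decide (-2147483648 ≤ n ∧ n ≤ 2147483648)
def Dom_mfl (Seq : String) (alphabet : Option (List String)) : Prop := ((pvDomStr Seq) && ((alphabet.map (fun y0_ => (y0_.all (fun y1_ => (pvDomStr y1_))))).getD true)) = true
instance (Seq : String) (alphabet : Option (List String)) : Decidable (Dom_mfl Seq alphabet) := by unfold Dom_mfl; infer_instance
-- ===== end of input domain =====

-- B replaces the per-k rebuilding of k-mer sets by one precomputed array of
-- longest-common-prefix-with-an-earlier-suffix values, from which the number of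
-- distinct k-mers for every k is obtained by counting (objective: alternative).

-- ===== PORT A =====
def pvGetAlphabet (Seq : String) : PySem.Set String :=
  Seq.toList.foldl (fun st c => PySem.Set.add st (String.ofList [c])) PySem.Set.empty

def pvGetKmers (Seq : String) (k : Nat) : PySem.Set String :=
  (PySem.List.pyRange 0 (PySem.Str.len Seq - (k : Int) + 1) 1).foldl
    (fun st i => PySem.Set.add st (PySem.Str.slice Seq (some i) (some (i + (k : Int))))) PySem.Set.empty

-- A's unbounded search loop; k only grows, and under Pre_ the loop always returns by
-- k = len(Seq)+1, so fuel len(Seq)+1 is exact (the fuel-0 branch is unreachable).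
def pvLoopA (Seq : String) (a : Int) : Nat → Nat → Int
  | 0, k => (k : Int) + 1
  | f+1, k =>
    if PySem.Set.len (pvGetKmers Seq (k+1)) ≠ a ^ (k+1) then (k : Int) + 1
    else pvLoopA Seq a f (k+1)

def mfl (Seq : String) (alphabet : Option (List String)) : Int :=
  let a : Int :=
    match alphabet with
    | none => PySem.Set.len (pvGetAlphabet Seq)
    | some l => PySem.List.len l
  pvLoopA Seq a (Seq.toList.length + 1) 0

-- ===== PORT B =====
-- the inner 'while' of Source B; indices j+l, i+l are in range whenever i+l < n and j < i
def pvLcp (s : List Char) (j i : Nat) : Nat → Nat → Nat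
  | 0, l => l
  | f+1, l =>
    if i + l < s.length ∧ s.getD (j + l) 'a' = s.getD (i + l) 'a' then pvLcp s j i f (l + 1)
    else l

def pvBest (s : List Char) (i : Nat) : Nat :=
  (List.range i).foldl (fun best j => max best (pvLcp s j i (s.length + 1) 0)) 0

def pvMArr (s : List Char) : List Nat :=
  (List.range s.length).map (pvBest s)

-- Source B's final 'for k in range(1, n+1)' loop, fuel = number of remaining iterations
def pvLoopB (s : List Char) (a : Int) (M : List Nat) : Nat → Nat → Int
  | 0, _ => (s.length : Int) + 1
  | f+1, k =>
    if (s.length : Int) - (k : Int) + 1 - (M.countP (fun m => decide (k ≤ m)) : Int) ≠ a ^ k then (k : Int)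
    else pvLoopB s a M f (k + 1)

def mfl_alt (Seq : String) (alphabet : Option (List String)) : Int :=
  let s := Seq.toList
  let a : Int :=
    match alphabet with
    | none => PySem.Set.len (PySem.Set.ofList s)   -- len(set(Seq)): distinct characters
    | some l => PySem.List.len l
  pvLoopB s a (pvMArr s) s.length 1

-- ===== PRECONDITION & SPEC =====
-- Pre_ excludes exactly the inputs on which A never returns (its unbounded search
-- loop never terminates): an empty sequence together with no / an empty alphabet.
def Pre_mfl (Seq : String) (alphabet : Option (List String)) : Prop :=
  ¬ (Seq = "" ∧ (alphabet = none ∨ alphabet = some []))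
instance (Seq : String) (alphabet : Option (List String)) : Decidable (Pre_mfl Seq alphabet) := by
  unfold Pre_mfl; infer_instance

def pvWitness_mfl : String × Option (List String) := ("ab", none)

def Spec_mfl (Seq : String) (alphabet : Option (List String)) (out : Int) : Prop := out = mfl_alt Seq alphabet
instance (Seq : String) (alphabet : Option (List String)) (out : Int) : Decidable (Spec_mfl Seq alphabet out) := by unfold Spec_mfl; infer_instance

-- ===== CLAIM (what is proved, stated in full; the proofs are below) =====
def Claim_equal_mfl : Prop := ∀ (Seq : String) (alphabet : Option (List String)), Dom_mfl Seq alphabet → Pre_mfl Seq alphabet → Spec_mfl Seq alphabet (mfl Seq alphabet)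

-- ===== LEMMAS AND PROOFS =====

-- building a set by adding f x for each x is building it from the mapped list
lemma foldl_add_map {α β : Type} [BEq β] (f : α → β) (l : List α) (S : PySem.Set β) :
    l.foldl (fun st x => PySem.Set.add st (f x)) S = (l.map f).foldl PySem.Set.add S := by
  rw [List.foldl_map]

lemma add_map_inj {α β : Type} [BEq α] [LawfulBEq α] [BEq β] [LawfulBEq β] (f : α → β)
    (hf : Function.Injective f) (S : PySem.Set α) (x : α) :
    PySem.Set.add (S.map f) (f x) = (PySem.Set.add S x).map f := by
  simp only [PySem.Set.add, PySem.Set.contains]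
  by_cases h : x ∈ S
  · simp [h, List.mem_map_of_injective hf]
  · simp [h, List.mem_map_of_injective hf]

lemma ofList_map_inj {α β : Type} [BEq α] [LawfulBEq α] [BEq β] [LawfulBEq β] (f : α → β)
    (hf : Function.Injective f) (l : List α) :
    PySem.Set.ofList (l.map f) = (PySem.Set.ofList l).map f := by
  rw [PySem.Set.ofList_eq_foldl, PySem.Set.ofList_eq_foldl]
  have h : ∀ (l : List α) (S : PySem.Set α),
      (l.map f).foldl PySem.Set.add (S.map f) = (l.foldl PySem.Set.add S).map f := by
    intro l
    induction l with
    | nil => intro S; rfl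
    | cons x t ih => intro S; simp only [List.map_cons, List.foldl_cons, add_map_inj f hf, ih]
  simpa using h l []

lemma len_ofList_map_inj {α β : Type} [BEq α] [LawfulBEq α] [BEq β] [LawfulBEq β] (f : α → β)
    (hf : Function.Injective f) (l : List α) :
    (PySem.Set.ofList (l.map f)).length = (PySem.Set.ofList l).length := by
  rw [ofList_map_inj f hf]; exact List.length_map ..

-- distinct count = number of first occurrences
lemma ofList_concat {α : Type} [BEq α] (xs : List α) (x : α) :
    PySem.Set.ofList (xs ++ [x]) = PySem.Set.add (PySem.Set.ofList xs) x := by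
  simp [PySem.Set.ofList_eq_foldl, List.foldl_append]

lemma length_add {α : Type} [BEq α] [LawfulBEq α] (xs : List α) (x : α) :
    (PySem.Set.add (PySem.Set.ofList xs) x).length
      = (PySem.Set.ofList xs).length + (if x ∈ xs then 0 else 1) := by
  simp only [PySem.Set.add, PySem.Set.contains]
  by_cases h : x ∈ xs
  · simp [h, PySem.Set.mem_ofList]
  · simp [h, PySem.Set.mem_ofList]

lemma len_ofList_map_range {α : Type} [BEq α] [LawfulBEq α] (g : Nat → α) (m : Nat) :
    (PySem.Set.ofList ((List.range m).map g)).length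
      = (List.range m).countP (fun i => (List.range i).all (fun j => g j != g i)) := by
  induction m with
  | zero => rfl
  | succ m ih =>
    rw [List.range_succ, List.map_append, List.map_cons, List.map_nil, ofList_concat,
      length_add, List.countP_append, ih]
    have hPm : (((List.range m).all (fun j => g j != g m)) = true) ↔ (∀ j < m, g j ≠ g m) := by
      simp [List.all_eq_true, List.mem_range]
    have hmem : (g m ∈ (List.range m).map g) ↔ ¬ (∀ j < m, g j ≠ g m) := by
      simp only [List.mem_map, List.mem_range, ne_eq]
      push Not
      constructor
      · rintro ⟨j, hj, he⟩; exact ⟨j, hj, he⟩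
      · rintro ⟨j, hj, he⟩; exact ⟨j, hj, he⟩
    by_cases h : ∀ j < m, g j ≠ g m
    · have hnm : ¬ (g m ∈ (List.range m).map g) := fun hc => (hmem.mp hc) h
      simp [hnm, hPm.mpr h]
    · have hin : g m ∈ (List.range m).map g := hmem.mpr h
      have hPf : ¬ (((List.range m).all (fun j => g j != g m)) = true) := fun hc => h (hPm.mp hc)
      simp [hin, hPf]

lemma lcp_ge (s : List Char) (j i : Nat) : ∀ f l, l ≤ pvLcp s j i f l := by
  intro f
  induction f with
  | zero => intro l; simp [pvLcp]
  | succ f ih =>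
    intro l
    simp only [pvLcp]
    split
    · exact le_trans (by omega) (ih (l+1))
    · exact le_refl l

lemma lcp_le_bound (s : List Char) (j i : Nat) :
    ∀ f l, i + l ≤ s.length → pvLcp s j i f l ≤ s.length - i := by
  intro f
  induction f with
  | zero => intro l h; simp [pvLcp]; omega
  | succ f ih =>
    intro l h
    simp only [pvLcp]
    split
    · next hc => exact ih (l+1) (by omega)
    · omega

lemma lcp_spec (s : List Char) (j i : Nat) :
    ∀ f l k, i + l ≤ s.length → s.length < f + i + l →
      (∀ m, m < l → s.getD (j + m) 'a' = s.getD (i + m) 'a') → l ≤ k →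
      (k ≤ pvLcp s j i f l ↔ (i + k ≤ s.length ∧ ∀ m, m < k → s.getD (j + m) 'a' = s.getD (i + m) 'a')) := by
  intro f
  induction f with
  | zero => intro l k h1 h2; omega
  | succ f ih =>
    intro l k h1 h2 hinv hlk
    simp only [pvLcp]
    split
    · next hc =>
      rcases Nat.eq_or_lt_of_le hlk with heq | hlt
      · subst heq
        constructor
        · intro _; exact ⟨h1, hinv⟩
        · intro _; exact le_trans (by omega) (lcp_ge s j i f (l+1))
      · have hinv' : ∀ m, m < l + 1 → s.getD (j + m) 'a' = s.getD (i + m) 'a' := by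
          intro m hm
          rcases Nat.lt_or_ge m l with h | h
          · exact hinv m h
          · have hml : m = l := by omega
            subst hml; exact hc.2
        exact ih (l+1) k (by omega) (by omega) hinv' (by omega)
    · next hc =>
      rcases Nat.eq_or_lt_of_le hlk with heq | hlt
      · subst heq
        simp only [le_refl, true_iff]
        exact ⟨h1, hinv⟩
      · constructor
        · intro h; omega
        · rintro ⟨hik, hall⟩
          exfalso
          rcases Classical.em (i + l < s.length) with h | h
          · exact hc ⟨h, hall l hlt⟩
          · omega

lemma lcp_iff (s : List Char) (j i k : Nat) (hi : i ≤ s.length) :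
    k ≤ pvLcp s j i (s.length + 1) 0 ↔
      (i + k ≤ s.length ∧ ∀ m, m < k → s.getD (j + m) 'a' = s.getD (i + m) 'a') := by
  exact lcp_spec s j i (s.length + 1) 0 k (by omega) (by omega) (by omega) (by omega)

lemma lt_foldl_max_iff (h : Nat → Nat) (l : List Nat) (c : Nat) :
    ∀ b0, c < l.foldl (fun b j => max b (h j)) b0 ↔ c < b0 ∨ ∃ j ∈ l, c < h j := by
  induction l with
  | nil => intro b0; simp
  | cons x t ih =>
    intro b0
    simp only [List.foldl_cons, ih, lt_max_iff, List.mem_cons]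
    constructor
    · rintro (⟨h1 | h1⟩ | ⟨j, hj, hcj⟩)
      · exact Or.inl h1
      · exact Or.inr ⟨x, Or.inl rfl, h1⟩
      · exact Or.inr ⟨j, Or.inr hj, hcj⟩
    · rintro (h1 | ⟨j, hj | hj, hcj⟩)
      · exact Or.inl (Or.inl h1)
      · subst hj; exact Or.inl (Or.inr hcj)
      · exact Or.inr ⟨j, hj, hcj⟩

lemma foldl_max_le_iff (h : Nat → Nat) (l : List Nat) (c : Nat) :
    ∀ b0, l.foldl (fun b j => max b (h j)) b0 ≤ c ↔ b0 ≤ c ∧ ∀ j ∈ l, h j ≤ c := by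
  induction l with
  | nil => intro b0; simp
  | cons x t ih =>
    intro b0
    simp only [List.foldl_cons, ih, max_le_iff, List.mem_cons]
    constructor
    · rintro ⟨⟨h1, h2⟩, h3⟩
      exact ⟨h1, fun j hj => hj.elim (fun e => e ▸ h2) (h3 j)⟩
    · rintro ⟨h1, h2⟩
      exact ⟨⟨h1, h2 x (Or.inl rfl)⟩, fun j hj => h2 j (Or.inr hj)⟩

lemma best_le_bound (s : List Char) (i : Nat) (hi : i ≤ s.length) :
    pvBest s i ≤ s.length - i := by
  unfold pvBest
  rw [foldl_max_le_iff]
  exact ⟨Nat.zero_le _, fun j _ => lcp_le_bound s j i (s.length + 1) 0 (by omega)⟩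

lemma best_ge_iff (s : List Char) (i k : Nat) (hk : 1 ≤ k) :
    k ≤ pvBest s i ↔ ∃ j < i, k ≤ pvLcp s j i (s.length + 1) 0 := by
  have h := lt_foldl_max_iff (fun j => pvLcp s j i (s.length + 1) 0) (List.range i) (k - 1) 0
  simp only [List.mem_range, Nat.not_lt_zero, false_or] at h
  unfold pvBest
  constructor
  · intro hle
    obtain ⟨j, hj, hl⟩ := h.mp (by omega)
    exact ⟨j, hj, by omega⟩
  · rintro ⟨j, hj, hl⟩
    have := h.mpr ⟨j, hj, by omega⟩
    omega

lemma take_drop_eq_iff (s : List Char) (j i k : Nat) (hj : j ≤ i) (hik : i + k ≤ s.length) :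
    (s.drop j).take k = (s.drop i).take k ↔
      ∀ m, m < k → s.getD (j + m) 'a' = s.getD (i + m) 'a' := by
  have hlen : ((s.drop j).take k).length = k := by simp; omega
  have hlen' : ((s.drop i).take k).length = k := by simp; omega
  constructor
  · intro he m hm
    have h1 : ((s.drop j).take k)[m]'(by omega) = ((s.drop i).take k)[m]'(by omega) := by
      simp [he]
    simp only [List.getElem_take, List.getElem_drop] at h1
    rw [List.getD_eq_getElem s 'a' (by omega), List.getD_eq_getElem s 'a' (by omega)]
    exact h1
  · intro hall
    apply List.ext_getElem (hlen.trans hlen'.symm)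
    intro m hm1 hm2
    simp only [List.getElem_take, List.getElem_drop]
    have hg := hall m (by omega)
    rwa [List.getD_eq_getElem s 'a' (by omega), List.getD_eq_getElem s 'a' (by omega)] at hg

-- the core count: for 1 ≤ k ≤ n, |distinct k-mers| = (n-k+1) - #{i : M[i] ≥ k}
lemma kmers_len (Seq : String) (k : Nat) (hk1 : 1 ≤ k) (hkn : k ≤ Seq.toList.length) :
    PySem.Set.len (pvGetKmers Seq k)
      = ((Seq.toList.length : Int) - k + 1)
        - ((pvMArr Seq.toList).countP (fun m => decide (k ≤ m)) : Int) := by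
  set s := Seq.toList with hs
  set n := s.length with hn
  set m := n + 1 - k with hm
  set g : Nat → List Char := fun j => (s.drop j).take k with hg
  set gS : Nat → String :=
    fun j : Nat => PySem.Str.slice Seq (some (j : Int)) (some ((j : Int) + (k : Int))) with hgS
  -- step 1: the k-mer set is ofList of the list of slices
  have h1 : pvGetKmers Seq k = PySem.Set.ofList ((List.range m).map gS) := by
    have hb : (PySem.Str.len Seq - (k : Int) + 1 - 0).toNat = m := by
      rw [PySem.Str.len_eq, ← hs]; omega
    unfold pvGetKmers
    rw [PySem.List.pyRange_one, hb, List.foldl_map, PySem.Set.ofList_eq_foldl, List.foldl_map]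
    simp only [zero_add]
    rfl
  -- step 2: pass to lists of characters (String.toList is injective)
  have htoL : ((List.range m).map gS).map String.toList = (List.range m).map g := by
    rw [List.map_map]
    refine List.map_congr_left (fun j _ => ?_)
    simp only [Function.comp_apply, hgS, PySem.Str.toList_slice, PySem.Chars.slice_eq_listSlice,
      PySem.List.slice_natCast_add, hg, hs]
  have h2 : (PySem.Set.ofList ((List.range m).map gS)).length
      = (PySem.Set.ofList ((List.range m).map g)).length := by
    rw [← htoL]
    exact (len_ofList_map_inj String.toList (fun a b hab => String.ext hab) _).symm
  -- step 3: count first occurrences, rephrased through pvBest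
  have h3 : (PySem.Set.ofList ((List.range m).map g)).length
      = (List.range m).countP (fun i => decide (¬ k ≤ pvBest s i)) := by
    rw [len_ofList_map_range]
    refine List.countP_congr (fun i hi => ?_)
    have him : i < m := List.mem_range.mp hi
    have hik : i + k ≤ n := by omega
    simp only [List.all_eq_true, List.mem_range, bne_iff_ne, decide_eq_true_eq]
    constructor
    · intro hfo hb
      obtain ⟨j, hj, hl⟩ := (best_ge_iff s i k hk1).mp hb
      have hch := ((lcp_iff s j i k (by omega)).mp hl).2
      exact hfo j hj ((take_drop_eq_iff s j i k (by omega) hik).mpr hch)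
    · intro hnb j hj he
      exact hnb ((best_ge_iff s i k hk1).mpr ⟨j, hj,
        (lcp_iff s j i k (by omega)).mpr ⟨hik, (take_drop_eq_iff s j i k (by omega) hik).mp he⟩⟩)
  -- step 4: complement the count
  have h4 : (List.range m).countP (fun i => decide (¬ k ≤ pvBest s i))
      = m - (List.range m).countP (fun i => decide (k ≤ pvBest s i)) := by
    have := List.length_eq_countP_add_countP (fun i => decide (k ≤ pvBest s i))
      (l := List.range m)
    simp only [List.length_range] at this
    have he : (List.range m).countP (fun i => decide (¬ k ≤ pvBest s i))
        = (List.range m).countP (fun a => decide (¬ (decide (k ≤ pvBest s a)) = true)) := by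
      refine List.countP_congr (fun i _ => by simp)
    omega
  -- step 5: extend the count over all of range n (the tail counts nothing)
  have h5 : (List.range n).countP (fun i => decide (k ≤ pvBest s i))
      = (List.range m).countP (fun i => decide (k ≤ pvBest s i)) := by
    have hsplit : List.range n = List.range m ++ (List.map (fun x => m + x) (List.range (k - 1))) := by
      rw [← List.range_add]; congr 1; omega
    rw [hsplit, List.countP_append]
    have hz : (List.countP (fun i => decide (k ≤ pvBest s i))
        ((List.range (k-1)).map (fun x => m + x))) = 0 := by
      rw [List.countP_eq_zero]
      intro i hi
      obtain ⟨t, ht, rfl⟩ := List.mem_map.mp hi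
      have htk : t < k - 1 := List.mem_range.mp ht
      have hb := best_le_bound s (m + t) (by omega)
      simp only [decide_eq_true_eq]
      omega
    omega
  -- step 6: the counted array is exactly pvMArr
  have h6 : (pvMArr s).countP (fun x => decide (k ≤ x))
      = (List.range n).countP (fun i => decide (k ≤ pvBest s i)) := by
    unfold pvMArr
    rw [List.countP_map]
    rfl
  have hcle : (List.range m).countP (fun i => decide (k ≤ pvBest s i)) ≤ m := by
    have := List.countP_le_length (p := fun i => decide (k ≤ pvBest s i)) (l := List.range m)
    simpa using this
  rw [h1]
  simp only [PySem.Set.len, h2, h3, h4, h6, h5]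
  omega

lemma distinct_top (Seq : String) :
    PySem.Set.len (pvGetKmers Seq (Seq.toList.length + 1)) = 0 := by
  unfold pvGetKmers
  rw [PySem.List.pyRange_one]
  have h0 : (PySem.Str.len Seq - ((Seq.toList.length + 1 : Nat) : Int) + 1 - 0).toNat = 0 := by
    rw [PySem.Str.len_eq]; push_cast; omega
  rw [h0]
  rfl

lemma loops_eq (Seq : String) (a : Int) (ha : 1 ≤ a) :
    ∀ f k, k + f = Seq.toList.length →
      pvLoopA Seq a (f + 1) k = pvLoopB Seq.toList a (pvMArr Seq.toList) f (k + 1) := by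
  intro f
  induction f with
  | zero =>
    intro k hk
    obtain rfl : k = Seq.toList.length := by omega
    rw [pvLoopA.eq_2, pvLoopB.eq_1, distinct_top,
      if_pos (pow_pos (by omega : (0:Int) < a) _).ne]
  | succ f ih =>
    intro k hk
    have hcond := kmers_len Seq (k + 1) (by omega) (by omega)
    rw [pvLoopA.eq_2, pvLoopB.eq_2, hcond]
    split_ifs with h
    · push_cast; ring
    · exact ih (k + 1) (by omega)

lemma a_eq (Seq : String) :
    PySem.Set.len (pvGetAlphabet Seq) = PySem.Set.len (PySem.Set.ofList Seq.toList) := by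
  have hinj : Function.Injective (fun c : Char => String.ofList [c]) := by
    intro a b h
    have h2 := congrArg String.toList h
    simpa using h2
  unfold pvGetAlphabet
  rw [foldl_add_map]
  have : (Seq.toList.map (fun c => String.ofList [c])).foldl PySem.Set.add PySem.Set.empty
      = PySem.Set.ofList (Seq.toList.map (fun c => String.ofList [c])) := by
    rw [PySem.Set.ofList_eq_foldl]; rfl
  rw [this]
  simp only [PySem.Set.len]
  exact_mod_cast len_ofList_map_inj _ hinj Seq.toList

lemma zero_case (Seq : String) (hn : 1 ≤ Seq.toList.length) :
    pvLoopA Seq 0 (Seq.toList.length + 1) 0 = 1 ∧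
      pvLoopB Seq.toList 0 (pvMArr Seq.toList) Seq.toList.length 1 = 1 := by
  -- the count of positions with M[i] ≥ 1 is at most n-1 (position 0 never counts)
  have hcnt : (pvMArr Seq.toList).countP (fun m => decide (1 ≤ m)) ≤ Seq.toList.length - 1 := by
    unfold pvMArr
    rw [List.countP_map]
    have hsplit : List.range Seq.toList.length
        = List.range 1 ++ (List.range (Seq.toList.length - 1)).map (fun x => 1 + x) := by
      rw [← List.range_add]; congr 1; omega
    rw [hsplit, List.countP_append]
    have h0 : (List.range 1).countP ((fun m => decide (1 ≤ m)) ∘ pvBest Seq.toList) = 0 := by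
      have hb0 : pvBest Seq.toList 0 = 0 := rfl
      simp [List.range_succ, hb0]
    have h1 := List.countP_le_length (p := (fun m => decide (1 ≤ m)) ∘ pvBest Seq.toList)
      (l := (List.range (Seq.toList.length - 1)).map (fun x => 1 + x))
    simp only [List.length_map, List.length_range] at h1
    omega
  have hval := kmers_len Seq 1 (le_refl 1) hn
  have hne : PySem.Set.len (pvGetKmers Seq 1) ≠ (0 : Int) ^ (0 + 1) := by
    rw [hval]
    simp only [pow_succ, pow_zero, one_mul]
    push_cast
    omega
  constructor
  · rw [pvLoopA.eq_2, if_pos hne]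
    norm_num
  · obtain ⟨f, hf⟩ : ∃ f, Seq.toList.length = f + 1 := ⟨Seq.toList.length - 1, by omega⟩
    rw [hf, pvLoopB.eq_2, hval] at *
    rw [if_pos (by simpa using hne)]
    norm_num

-- ===== VERDICT (by name: the statement is the Claim_ definition above) =====
theorem mfl_spec : Claim_equal_mfl := by
  intro Seq alphabet _hdom hpre
  unfold Pre_mfl at hpre
  show mfl Seq alphabet = mfl_alt Seq alphabet
  cases alphabet with
  | none =>
    have hne : Seq.toList ≠ [] := by
      intro h
      exact hpre ⟨String.ext (by simpa using h), Or.inl rfl⟩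
    simp only [mfl, mfl_alt, a_eq]
    have ha : 1 ≤ PySem.Set.len (PySem.Set.ofList Seq.toList) := by
      obtain ⟨c, hc⟩ := List.exists_mem_of_ne_nil Seq.toList hne
      have hmem : c ∈ PySem.Set.ofList Seq.toList := (PySem.Set.mem_ofList _ _).mpr hc
      have := List.length_pos_of_mem hmem
      simp only [PySem.Set.len]
      omega
    exact loops_eq Seq _ ha Seq.toList.length 0 (by omega)
  | some l =>
    by_cases hl : l = []
    · subst hl
      have hne : Seq ≠ "" := fun h => hpre ⟨h, Or.inr rfl⟩
      have hn : 1 ≤ Seq.toList.length := by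
        rcases Nat.eq_zero_or_pos Seq.toList.length with h | h
        · exact absurd (String.ext (by simpa using List.length_eq_zero_iff.mp h)) hne
        · omega
      obtain ⟨hA, hB⟩ := zero_case Seq hn
      simp only [mfl, mfl_alt]
      have hz : PySem.List.len ([] : List String) = 0 := rfl
      rw [hz, hA, hB]
    · have ha : 1 ≤ PySem.List.len l := by
        have : 1 ≤ l.length := List.length_pos_of_ne_nil hl
        simp only [PySem.List.len_eq]
        omega
      simp only [mfl, mfl_alt]
      exact loops_eq Seq _ ha Seq.toList.length 0 (by omega)
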